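-- pv_equiv track=rewrite | github.com/isayaksh/Algorithm | BaekJoon/21275.py | solution
-- ===== SOURCE A (Python) =====
-- def solution(A, B):
--
--     def calculation(n, formula):
--         return sum([formula[i] * n**(len(formula)-i-1) for i in range(len(formula))])
--
--     answer = []
--
--     dictionary = dict()
--     # 0 ~ 9
--     for i in range(10): dictionary[str(i)] = i
--     # a ~ z
--     for i in range(97, 123): dictionary[chr(i)] = i - 87
--
--     formulaA = [dictionary[a] for a in A]
--     formulaB = [dictionary[b] for b in B]
--
--     for a in range(max(formulaA)+1, 37):
--         for b in range(max(formulaB)+1, 37):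
--             calcA, calcB = calculation(a, formulaA), calculation(b, formulaB)
--             if calcA == calcB and a != b:
--                 answer.append([calcA, a, b])
--     return answer
-- ===== SOURCE B (Python) =====
-- def solution(A, B):
--     val = {c: v for v, c in enumerate("0123456789abcdefghijklmnopqrstuvwxyz")}
--     fa = [val[c] for c in A]
--     fb = [val[c] for c in B]
--
--     def evaluate(f, base):
--         r = 0
--         for d in f:
--             r = r * base + d
--         return r
--
--     index = {}
--     for b in range(max(fb) + 1, 37):
--         index.setdefault(evaluate(fb, b), []).append(b)
--
--     answer = []
--     for a in range(max(fa) + 1, 37):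
--         va = evaluate(fa, a)
--         for b in index.get(va, []):
--             if a != b:
--                 answer.append([va, a, b])
--     return answer
-- ===== Notes on version B (the rewrite author's own statement) =====
-- stated objective: faster
-- what changed: Replaces the nested scan over all (a,b) base pairs that re-evaluates both power sums in every pair by Horner evaluation plus a value-to-bases dict built once over B's bases, then a single lookup pass over A's bases; Pre_ excludes only inputs where A raises (a character outside 0-9a-z gives KeyError, an empty string gives ValueError from max([])).
import Mathlib
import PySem

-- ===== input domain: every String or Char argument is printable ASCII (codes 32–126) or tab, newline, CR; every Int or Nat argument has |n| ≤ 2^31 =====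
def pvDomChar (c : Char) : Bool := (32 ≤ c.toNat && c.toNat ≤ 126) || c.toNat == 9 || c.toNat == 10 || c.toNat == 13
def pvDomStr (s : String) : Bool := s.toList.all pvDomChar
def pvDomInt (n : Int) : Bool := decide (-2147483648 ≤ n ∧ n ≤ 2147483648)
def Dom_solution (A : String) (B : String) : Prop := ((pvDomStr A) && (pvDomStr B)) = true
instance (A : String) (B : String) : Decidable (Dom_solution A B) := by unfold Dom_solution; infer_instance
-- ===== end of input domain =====

-- B replaces A's nested scan over all base pairs (re-evaluating both numerals in every pair)
-- by Horner evaluation plus a value→bases index built once, then a single lookup pass; faster by a constant factor.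

-- ===== PORT A =====
-- dictionary built by the two range loops: str(i) -> i, chr(i) -> i-87
def solution_dict : PySem.Dict Char Int :=
  (PySem.List.pyRange 97 123 1).foldl
    (fun d i => d.insert (Char.ofNat i.toNat) (i - 87))
    ((PySem.List.pyRange 0 10 1).foldl
      (fun d i => d.insert (Char.ofNat (48 + i.toNat)) i) PySem.Dict.empty)

-- sum([formula[i] * n**(len(formula)-i-1) for i in range(len(formula))]);
-- the exponent is ≥ 0 for every i in range, so .toNat is exact there
def calculation (n : Int) (formula : List Int) : Int :=
  ((PySem.List.pyRange 0 (PySem.List.len formula) 1).map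
    (fun i => PySem.List.pyGetD formula i 0 * n ^ ((PySem.List.len formula) - i - 1).toNat)).sum

def solution (A : String) (B : String) : List (List Int) :=
  -- dictionary[a]: KeyError (= none) excluded by Pre_, .getD 0 unreachable there
  let formulaA := A.toList.map (fun c => (solution_dict.get? c).getD 0)
  let formulaB := B.toList.map (fun c => (solution_dict.get? c).getD 0)
  -- max(...): ValueError on the empty list excluded by Pre_, .getD 0 unreachable there
  let mA := (PySem.List.max? formulaA (fun x => x)).getD 0
  let mB := (PySem.List.max? formulaB (fun x => x)).getD 0
  (PySem.List.pyRange (mA + 1) 37 1).foldl (fun answer a =>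
    (PySem.List.pyRange (mB + 1) 37 1).foldl (fun answer b =>
      let calcA := calculation a formulaA
      let calcB := calculation b formulaB
      if calcA = calcB ∧ a ≠ b then answer ++ [[calcA, a, b]] else answer) answer) []

-- ===== PORT B =====
-- {c: v for v, c in enumerate("0123456789abcdefghijklmnopqrstuvwxyz")}
def pvVal : PySem.Dict Char Int :=
  (PySem.List.enumerate "0123456789abcdefghijklmnopqrstuvwxyz".toList 0).foldl
    (fun d p => d.insert p.2 p.1) PySem.Dict.empty

-- Horner evaluation of the digit list in the given base
def pvEval (f : List Int) (base : Int) : Int :=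
  f.foldl (fun r d => r * base + d) 0

def solution_alt (A : String) (B : String) : List (List Int) :=
  let fa := A.toList.map (fun c => (pvVal.get? c).getD 0)   -- KeyError excluded by Pre_
  let fb := B.toList.map (fun c => (pvVal.get? c).getD 0)
  -- index: value of B in base b -> ascending list of such bases b (setdefault(...).append(b))
  let index := (PySem.List.pyRange ((PySem.List.max? fb (fun x => x)).getD 0 + 1) 37 1).foldl
    (fun d b => d.insert (pvEval fb b) (d.getD (pvEval fb b) [] ++ [b])) PySem.Dict.empty
  (PySem.List.pyRange ((PySem.List.max? fa (fun x => x)).getD 0 + 1) 37 1).foldl (fun answer a =>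
    let va := pvEval fa a
    (index.getD va []).foldl (fun answer b =>
      if a ≠ b then answer ++ [[va, a, b]] else answer) answer) []

-- ===== PRECONDITION & SPEC =====
-- Pre_ excludes exactly the inputs where A raises: a char outside 0-9a-z (KeyError) or an
-- empty string (ValueError from max of an empty list).
def pvDigit (c : Char) : Bool :=
  (48 ≤ c.toNat && c.toNat ≤ 57) || (97 ≤ c.toNat && c.toNat ≤ 122)
def Pre_solution (A : String) (B : String) : Prop :=
  A.toList ≠ [] ∧ B.toList ≠ [] ∧ A.toList.all pvDigit = true ∧ B.toList.all pvDigit = true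
instance (A : String) (B : String) : Decidable (Pre_solution A B) := by unfold Pre_solution; infer_instance

def pvWitness_solution : String × String := ("z", "z")

def Spec_solution (A : String) (B : String) (out : List (List Int)) : Prop := out = solution_alt A B
instance (A : String) (B : String) (out : List (List Int)) : Decidable (Spec_solution A B out) := by unfold Spec_solution; infer_instance

-- ===== CLAIM (what is proved, stated in full; the proofs are below) =====
def Claim_equal_solution : Prop := ∀ (A : String) (B : String), Dom_solution A B → Pre_solution A B → Spec_solution A B (solution A B)

-- ===== LEMMAS AND PROOFS =====

-- on the 36 admitted characters the two dictionaries agree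
set_option maxRecDepth 10000 in
lemma dict_agree (c : Char) (h : pvDigit c = true) :
    (solution_dict.get? c).getD 0 = (pvVal.get? c).getD 0 := by
  have hb : (48 ≤ c.toNat ∧ c.toNat ≤ 57) ∨ (97 ≤ c.toNat ∧ c.toNat ≤ 122) := by
    simp [pvDigit] at h; omega
  rw [← Char.ofNat_toNat c]
  generalize hn : c.toNat = n at hb
  rcases hb with ⟨h1, h2⟩ | ⟨h1, h2⟩ <;> interval_cases n <;> decide

-- A's power-sum in Nat-range/getD form
def calcN (n : Int) (f : List Int) : Int :=
  ((List.range f.length).map (fun k => f.getD k 0 * n ^ (f.length - k - 1))).sum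

lemma calculation_eq_calcN (n : Int) (f : List Int) : calculation n f = calcN n f := by
  unfold calculation calcN
  rw [PySem.List.len_eq, PySem.List.pyRange_zero_nat, List.map_map]
  refine congrArg List.sum (List.map_congr_left ?_)
  intro k hk
  rw [List.mem_range] at hk
  simp only [Function.comp, PySem.List.pyGetD_natCast]
  congr 1
  congr 1
  omega

lemma calcN_cons (n d : Int) (f : List Int) :
    calcN n (d :: f) = d * n ^ f.length + calcN n f := by
  unfold calcN
  simp [List.range_succ_eq_map, List.map_map, Function.comp_def, Nat.succ_sub_succ]

lemma horner_acc (f : List Int) (n acc : Int) :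
    f.foldl (fun r d => r * n + d) acc = acc * n ^ f.length + calcN n f := by
  induction f generalizing acc with
  | nil => simp [calcN]
  | cons d t ih => rw [List.foldl_cons, ih, calcN_cons, List.length_cons]; ring

-- Horner = A's power sum
lemma calc_eq_horner (n : Int) (f : List Int) : calculation n f = pvEval f n := by
  rw [calculation_eq_calcN, pvEval, horner_acc]; ring

-- the index dict characterisation: getD v [] = the bases of the scanned list whose value is v
lemma idx_getD (g : Int → Int) (l : List Int) (d : PySem.Dict Int (List Int)) (v : Int) :
    (l.foldl (fun d b => d.insert (g b) (d.getD (g b) [] ++ [b])) d).getD v []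
      = d.getD v [] ++ l.filter (fun b => g b == v) := by
  induction l generalizing d with
  | nil => simp
  | cons b t ih =>
    rw [List.foldl_cons, ih, List.filter_cons]
    by_cases h : g b = v
    · simp [h]
    · simp [PySem.Dict.getD_insert, h, Ne.symm h]

-- A's guarded inner loop = B's loop over the pre-filtered list
lemma inner_loop (g : Int → Int) (va a : Int) (l : List Int) (acc : List (List Int)) :
    l.foldl (fun acc b => if va = g b ∧ a ≠ b then acc ++ [[va, a, b]] else acc) acc
      = (l.filter (fun b => g b == va)).foldl
          (fun acc b => if a ≠ b then acc ++ [[va, a, b]] else acc) acc := by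
  induction l generalizing acc with
  | nil => rfl
  | cons b t ih =>
    rw [List.foldl_cons, List.filter_cons]
    by_cases h : g b = va
    · simp only [h, beq_self_eq_true, if_pos, List.foldl_cons, eq_self, true_and, ih]
    · have hno : ¬ (va = g b ∧ a ≠ b) := fun hp => h hp.1.symm
      simp only [hno, if_neg, not_false_iff, beq_iff_eq, h, ih]

-- ===== VERDICT (by name: the statement is the Claim_ definition above) =====
theorem solution_spec : Claim_equal_solution := by
  intro A B _ hPre
  obtain ⟨-, -, hAc, hBc⟩ := hPre
  rw [List.all_eq_true] at hAc hBc
  show solution A B = solution_alt A B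
  simp only [solution, solution_alt]
  rw [List.map_congr_left (fun c hc => dict_agree c (hAc c hc)),
      List.map_congr_left (fun c hc => dict_agree c (hBc c hc))]
  set fa := A.toList.map (fun c => (pvVal.get? c).getD 0) with hfa
  set fb := B.toList.map (fun c => (pvVal.get? c).getD 0) with hfb
  set rB := PySem.List.pyRange ((PySem.List.max? fb (fun x => x)).getD 0 + 1) 37 1 with hrB
  congr 1
  funext ans a
  simp only [calc_eq_horner]
  rw [idx_getD (pvEval fb) rB PySem.Dict.empty (pvEval fa a)]
  simp only [PySem.Dict.getD_empty, List.nil_append]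
  exact inner_loop (pvEval fb) (pvEval fa a) a rB ans
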